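-- pv_equiv track=rewrite | github.com/Arsen1302/Code-copy-detector | TestData/solutions/problem_1097_3.py | solution_1097_3
-- ===== SOURCE A (Python) =====
-- def solution_1097_3(s: str) -> int:
--     occ=dict()
--     mx=-1
--     for i in range(0,len(s)):
--         if s[i] in occ.keys():
--             if i-occ[s[i]]-1>mx:
--                 mx=i-occ[s[i]]-1
--         else:
--             occ.update({s[i]:i})
--     return mx
-- ===== SOURCE B (Python) =====
-- def solution_1097_3(s: str) -> int:
--     # Index-table-then-reduce: record first and last occurrence of each char,
--     # then take the max of last[c] - first[c] - 1 over distinct chars, seeded at -1.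
--     first = {}
--     last = {}
--     for i, c in enumerate(s):
--         if c not in first:
--             first[c] = i
--         last[c] = i
--     mx = -1
--     for c in first:
--         mx = max(mx, last[c] - first[c] - 1)
--     return mx
-- ===== Notes on version B (the rewrite author's own statement) =====
-- stated objective: alternative
-- what changed: A keeps a running maximum while scanning with a first-occurrence dict; B builds first/last occurrence tables in one enumerate scan and then reduces max(last[c]-first[c]-1) over distinct characters only (constant-factor win: no per-index s[i] indexing and the max work moves from every position to the few distinct chars).
import Mathlib
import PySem

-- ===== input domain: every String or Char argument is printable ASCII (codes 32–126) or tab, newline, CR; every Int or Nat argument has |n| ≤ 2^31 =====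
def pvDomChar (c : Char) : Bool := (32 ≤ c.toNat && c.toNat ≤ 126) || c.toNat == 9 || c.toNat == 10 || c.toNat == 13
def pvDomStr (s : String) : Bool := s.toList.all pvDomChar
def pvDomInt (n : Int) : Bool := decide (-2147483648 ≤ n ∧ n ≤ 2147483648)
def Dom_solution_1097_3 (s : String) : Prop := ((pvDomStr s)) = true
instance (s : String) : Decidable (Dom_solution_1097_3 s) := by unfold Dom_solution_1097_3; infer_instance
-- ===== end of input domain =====

-- B replaces A's running-max-during-scan with first/last occurrence tables built in one scan
-- followed by a separate reduce over the distinct characters (alternative decomposition, same cost).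


-- ===== PORT A =====
-- literal port: loop i over range(0, len(s)); occ holds each char's first index;
-- the match's none branch is unreachable (i is always a valid index).
def solution_1097_3 (s : String) : Int :=
  ((PySem.List.pyRange 0 (PySem.Str.len s) 1).foldl
    (fun (st : PySem.Dict Char Int × Int) i =>
      match PySem.Str.pyGet? s i with
      | none => st
      | some c =>
        if st.1.contains c then
          if i - (st.1.get? c).getD 0 - 1 > st.2 then (st.1, i - (st.1.get? c).getD 0 - 1)
          else st
        else (st.1.insert c i, st.2))
    (PySem.Dict.empty, -1)).2

-- ===== PORT B =====
-- literal port of Source B: one enumerate scan builds (first, last), then a reduce over first's keys.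
def solution_1097_3_alt (s : String) : Int :=
  let fl := (PySem.List.enumerate s.toList 0).foldl
    (fun (st : PySem.Dict Char Int × PySem.Dict Char Int) p =>
      ((if st.1.contains p.2 then st.1 else st.1.insert p.2 p.1), st.2.insert p.2 p.1))
    (PySem.Dict.empty, PySem.Dict.empty)
  fl.1.keys.foldl (fun mx c => max mx (fl.2.getD c 0 - fl.1.getD c 0 - 1)) (-1)

-- ===== PRECONDITION & SPEC =====
def Spec_solution_1097_3 (s : String) (out : Int) : Prop := out = solution_1097_3_alt s
instance (s : String) (out : Int) : Decidable (Spec_solution_1097_3 s out) := by unfold Spec_solution_1097_3; infer_instance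

-- ===== CLAIM (what is proved, stated in full; the proofs are below) =====
def Claim_equal_solution_1097_3 : Prop := ∀ (s : String), Dom_solution_1097_3 s → Spec_solution_1097_3 s (solution_1097_3 s)

-- ===== LEMMAS AND PROOFS =====

-- A's loop body, after the (always-successful) indexing is resolved to the pair (i, c).
def pvStepA (st : PySem.Dict Char Int × Int) (p : Int × Char) : PySem.Dict Char Int × Int :=
  if st.1.contains p.2 then
    if p.1 - (st.1.get? p.2).getD 0 - 1 > st.2 then (st.1, p.1 - (st.1.get? p.2).getD 0 - 1)
    else st
  else (st.1.insert p.2 p.1, st.2)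

-- B's scan body.
def pvStepB (st : PySem.Dict Char Int × PySem.Dict Char Int) (p : Int × Char) :
    PySem.Dict Char Int × PySem.Dict Char Int :=
  ((if st.1.contains p.2 then st.1 else st.1.insert p.2 p.1), st.2.insert p.2 p.1)

-- B's reduce, with an arbitrary seed for the induction.
def pvReduce (K : List Char) (g : Char → Int) (a : Int) : Int :=
  K.foldl (fun mx c => max mx (g c)) a

theorem pvReduce_cons (k : Char) (K : List Char) (g : Char → Int) (a : Int) :
    pvReduce (k :: K) g a = pvReduce K g (max a (g k)) := rfl

theorem pvReduce_append_singleton (K : List Char) (c : Char) (g : Char → Int) (a : Int) :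
    pvReduce (K ++ [c]) g a = max (pvReduce K g a) (g c) := by
  simp [pvReduce, List.foldl_append]

theorem pvReduce_seed_max (K : List Char) (g : Char → Int) (a b : Int) :
    pvReduce K g (max a b) = max (pvReduce K g a) b := by
  induction K generalizing a with
  | nil => simp [pvReduce]
  | cons k K ih =>
    rw [pvReduce_cons, pvReduce_cons]
    rw [show max (max a b) (g k) = max (max a (g k)) b by
      rw [max_assoc, max_assoc, max_comm b (g k)]]
    exact ih _

theorem pvReduce_congr (K : List Char) (g g' : Char → Int) (a : Int)
    (h : ∀ c ∈ K, g c = g' c) : pvReduce K g a = pvReduce K g' a := by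
  exact PySem.List.foldl_congr_mem K _ _ a (fun acc x hx => by rw [h x hx])

theorem pvLe_reduce (K : List Char) (g : Char → Int) (a : Int) : a ≤ pvReduce K g a := by
  induction K generalizing a with
  | nil => simp [pvReduce]
  | cons k K ih =>
    exact le_trans (le_max_left a (g k)) (ih (max a (g k)))

-- Updating g at a key already in K to a not-smaller value maxes the old reduce with the new value.
theorem pvReduce_update (g g' : Char → Int) (v : Int) (c : Char) (K : List Char) (a : Int)
    (hc : c ∈ K) (hle : g c ≤ v)
    (hg' : ∀ c', g' c' = if c' = c then v else g c') :
    pvReduce K g' a = max (pvReduce K g a) v := by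
  induction K generalizing a with
  | nil => cases hc
  | cons k K ih =>
    rw [pvReduce_cons, pvReduce_cons]
    by_cases hk : k = c
    · subst hk
      rw [show g' k = v from by rw [hg']; simp]
      by_cases hmem : k ∈ K
      · rw [pvReduce_seed_max K g' a v, pvReduce_seed_max K g a (g k), ih a hmem]
        rw [max_assoc, max_self, max_assoc, max_eq_right hle]
      · have hthis : ∀ x ∈ K, g' x = g x := by
          intro x hx
          rw [hg']
          have hxk : ¬ x = k := fun h => hmem (h ▸ hx)
          simp [hxk]
        rw [pvReduce_congr K g' g (max a v) (fun x hx => (hthis x hx))]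
        rw [pvReduce_seed_max K g a v, pvReduce_seed_max K g a (g k)]
        rw [max_assoc, max_eq_right hle]
    · have hc' : c ∈ K := by
        cases hc with
        | head => exact absurd rfl hk
        | tail _ h => exact h
      rw [show g' k = g k from by rw [hg']; simp [hk]]
      exact ih _ hc'

-- The derived gap function of a (first, last) pair of tables.
def pvGap (first last : PySem.Dict Char Int) (c : Char) : Int :=
  last.getD c 0 - first.getD c 0 - 1

-- Main invariant: running A's loop from any state whose mx already equals B's reduce of the
-- tables built so far yields exactly B's reduce of the final tables (and the same first table).
theorem pvMain (l : List Char) (start : Int) (d last : PySem.Dict Char Int) (mx : Int)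
    (hlt : ∀ c ∈ d.keys, d.getD c 0 ≤ last.getD c 0 ∧ last.getD c 0 < start)
    (hmx : mx = pvReduce d.keys (pvGap d last) (-1)) :
    (PySem.List.enumerate l start).foldl pvStepA (d, mx) =
      (((PySem.List.enumerate l start).foldl pvStepB (d, last)).1,
        pvReduce ((PySem.List.enumerate l start).foldl pvStepB (d, last)).1.keys
          (pvGap ((PySem.List.enumerate l start).foldl pvStepB (d, last)).1
                 ((PySem.List.enumerate l start).foldl pvStepB (d, last)).2) (-1)) := by
  induction l generalizing start d last mx with
  | nil => simp [PySem.List.enumerate_nil, hmx]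
  | cons c l ih =>
    rw [PySem.List.enumerate_cons]
    simp only [List.foldl_cons]
    by_cases hin : d.contains c = true
    · have hcK : c ∈ d.keys := (PySem.Dict.contains_iff_mem_keys d c).mp hin
      have hstep : pvStepA (d, mx) (start, c) = (d, max mx (start - d.getD c 0 - 1)) := by
        simp only [pvStepA, hin, if_true, PySem.Dict.getD_eq_get?_getD]
        by_cases h : start - (d.get? c).getD 0 - 1 ≤ mx
        · simp [not_lt.mpr h, max_eq_left h]
        · rw [not_le] at h
          simp [h, max_eq_right (le_of_lt h)]
      have hstepB : pvStepB (d, last) (start, c) = (d, last.insert c start) := by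
        simp [pvStepB, hin]
      rw [hstep, hstepB]
      apply ih
      · intro c' hc'
        by_cases hcc : c' = c
        · subst hcc
          have h := hlt c' hc'
          rw [PySem.Dict.getD_insert_self]
          exact ⟨le_trans h.1 (le_of_lt h.2), by omega⟩
        · rw [PySem.Dict.getD_insert_of_ne _ _ _ hcc]
          have h := hlt c' hc'
          exact ⟨h.1, by omega⟩
      · have hupd : pvReduce d.keys (pvGap d (last.insert c start)) (-1) =
            max (pvReduce d.keys (pvGap d last) (-1)) (start - d.getD c 0 - 1) := by
          apply pvReduce_update (pvGap d last) _ _ c d.keys (-1) hcK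
          · have h := hlt c hcK; unfold pvGap; omega
          · intro c'
            by_cases hcc : c' = c
            · subst hcc; simp [pvGap, PySem.Dict.getD_insert_self]
            · simp [pvGap, hcc, PySem.Dict.getD_insert_of_ne _ _ _ hcc]
        rw [hupd, hmx, max_comm]
    · have hin' : d.contains c = false := by simpa using hin
      have hcK : c ∉ d.keys := fun h => hin ((PySem.Dict.contains_iff_mem_keys d c).mpr h)
      have hstep : pvStepA (d, mx) (start, c) = (d.insert c start, mx) := by
        simp [pvStepA, hin']
      have hstepB : pvStepB (d, last) (start, c) = (d.insert c start, last.insert c start) := by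
        simp [pvStepB, hin']
      rw [hstep, hstepB]
      apply ih
      · intro c' hc'
        rw [PySem.Dict.keys_insert_of_not_contains _ _ hin'] at hc'
        by_cases hcc : c' = c
        · subst hcc
          rw [PySem.Dict.getD_insert_self, PySem.Dict.getD_insert_self]
          omega
        · rw [PySem.Dict.getD_insert_of_ne _ _ _ hcc, PySem.Dict.getD_insert_of_ne _ _ _ hcc]
          have hc'' : c' ∈ d.keys := by
            rcases List.mem_append.mp hc' with h | h
            · exact h
            · simp at h; exact absurd h hcc
          have h := hlt c' hc''
          exact ⟨h.1, by omega⟩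
      · rw [PySem.Dict.keys_insert_of_not_contains _ _ hin']
        rw [pvReduce_append_singleton]
        have hgap : pvGap (d.insert c start) (last.insert c start) c = -1 := by
          simp [pvGap, PySem.Dict.getD_insert_self]
        rw [hgap]
        have hcongr : pvReduce d.keys (pvGap (d.insert c start) (last.insert c start)) (-1) =
            pvReduce d.keys (pvGap d last) (-1) := by
          apply pvReduce_congr
          intro c' hc'
          have hcc : c' ≠ c := fun h => hcK (h ▸ hc')
          simp [pvGap, PySem.Dict.getD_insert_of_ne _ _ _ hcc]
        rw [hcongr, hmx]
        exact (max_eq_left (pvLe_reduce d.keys (pvGap d last) (-1))).symm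

-- In-range Python indexing always succeeds and agrees with the defaulted lookup.
theorem pvGet_in_range (xs : List Char) (x : Int) (h0 : 0 ≤ x) (h1 : x < PySem.List.len xs) :
    PySem.List.pyGet? xs x = some (PySem.List.pyGetD xs x ' ') := by
  have h1' : x < (xs.length : Int) := by simpa [PySem.List.len] using h1
  simp [PySem.List.pyGet?, PySem.List.pyGetD, PySem.List.pyIdx?, h0, h1']

-- Port A's index loop is the pvStepA fold over enumerate(s).
theorem pvA_eq (s : String) :
    solution_1097_3 s =
      ((PySem.List.enumerate s.toList 0).foldl pvStepA (PySem.Dict.empty, -1)).2 := by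
  unfold solution_1097_3
  rw [PySem.List.enumerate_eq_map_pyRange s.toList ' ', List.foldl_map]
  have hlen : PySem.Str.len s = PySem.List.len s.toList := by simp [pysem, PySem.List.len]
  rw [hlen]
  congr 1
  apply PySem.List.foldl_congr_mem
  intro acc x hx
  rw [PySem.List.mem_pyRange_one] at hx
  have hget : PySem.Str.pyGet? s x = some (PySem.List.pyGetD s.toList x ' ') := by
    rw [show PySem.Str.pyGet? s x = PySem.List.pyGet? s.toList x by simp [pysem]]
    exact pvGet_in_range s.toList x hx.1 hx.2
  rw [hget]
  rfl

-- Port B is literally the pvStepB fold followed by the pvReduce over the gaps.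
theorem pvB_eq (s : String) :
    solution_1097_3_alt s =
      pvReduce ((PySem.List.enumerate s.toList 0).foldl pvStepB (PySem.Dict.empty, PySem.Dict.empty)).1.keys
        (pvGap ((PySem.List.enumerate s.toList 0).foldl pvStepB (PySem.Dict.empty, PySem.Dict.empty)).1
               ((PySem.List.enumerate s.toList 0).foldl pvStepB (PySem.Dict.empty, PySem.Dict.empty)).2) (-1) := rfl

-- ===== VERDICT (by name: the statement is the Claim_ definition above) =====
theorem solution_1097_3_spec : Claim_equal_solution_1097_3 := by
  intro s _
  unfold Spec_solution_1097_3
  rw [pvA_eq, pvB_eq]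
  rw [pvMain s.toList 0 PySem.Dict.empty PySem.Dict.empty (-1)
    (by simp [PySem.Dict.keys_empty]) (by simp [pvReduce, PySem.Dict.keys_empty])]
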